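-- pv_equiv track=rewrite | github.com/dojo-se/Microwave-Numbers | microwave_numbers.py | microwave_numbers
-- ===== SOURCE A (Python) =====
-- KEYBOARD = ((1, 2, 3), (4, 5, 6), (7, 8, 9), (None, 0, '*'))
--
-- def _position(number):
--     for row, col in enumerate(KEYBOARD):
--         try:
--             return row, col.index(int(number))
--         except ValueError:
--             pass
--
-- def _steps_between(position_initial, position_final):
--     effort_between_rows = abs(position_initial[0] - position_final[0])
--     effort_between_cols = abs(position_initial[1] - position_final[1])
--     return effort_between_cols + effort_between_rows
--
-- def microwave_numbers(seconds):
--     s_distance = []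
--     for i in str(seconds):
--         s_distance.append(_position(i))
--
--     s_effort = 0
--     for j in range(len(s_distance)-1):
--         s_effort += _steps_between(s_distance[j], s_distance[j+1])
--
--     minutes = (lambda x,y: x*100+y)(*divmod(seconds, 60))
--
--     m_distance = []
--     for i in str(minutes):
--         m_distance.append(_position(i))
--
--     m_effort = 0
--     for j in range(len(m_distance)-1):
--         m_effort += _steps_between(m_distance[j], m_distance[j+1])
--
--     return s_effort < m_effort and seconds or minutes
-- ===== SOURCE B (Python) =====
-- def _coord(d):
--     return (3, 1) if d == 0 else ((d - 1) // 3, (d - 1) % 3)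
--
-- # distance table between every pair of keypad digits, built once
-- _DIST = [abs(_coord(a)[0] - _coord(b)[0]) + abs(_coord(a)[1] - _coord(b)[1])
--          for a in range(10) for b in range(10)]
--
-- def _travel(n):
--     # total keypad travel over the digits of n, extracted right-to-left
--     e = 0
--     while n >= 10:
--         n, d = divmod(n, 10)
--         e += _DIST[10 * (n % 10) + d]
--     return e
--
-- def microwave_numbers(seconds):
--     minutes = 100 * (seconds // 60) + seconds % 60
--     return seconds if _travel(seconds) < _travel(minutes) else minutes
-- ===== Notes on version B (the rewrite author's own statement) =====
-- stated objective: alternative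
-- what changed: B never builds str(n) or position lists: it extracts digits numerically right-to-left with divmod and accumulates effort from a precomputed 10x10 digit-pair distance table built once from closed-form keypad coordinates, instead of A's per-character table scan over KEYBOARD plus two index-based loops over position lists.
import Mathlib
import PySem

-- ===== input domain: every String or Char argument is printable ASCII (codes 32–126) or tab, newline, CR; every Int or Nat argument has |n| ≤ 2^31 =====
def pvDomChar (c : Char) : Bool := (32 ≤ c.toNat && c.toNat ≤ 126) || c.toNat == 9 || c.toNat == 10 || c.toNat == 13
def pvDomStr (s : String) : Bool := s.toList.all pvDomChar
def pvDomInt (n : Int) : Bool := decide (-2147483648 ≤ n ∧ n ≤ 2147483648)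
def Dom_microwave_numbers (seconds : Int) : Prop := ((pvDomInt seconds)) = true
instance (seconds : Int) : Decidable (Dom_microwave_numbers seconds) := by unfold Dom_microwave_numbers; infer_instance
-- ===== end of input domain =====

-- B avoids A's per-character keypad-table scan and position lists entirely: it
-- extracts digits numerically (divmod, right-to-left) and sums a precomputed
-- 10x10 digit-pair distance table (objective: alternative).

-- ===== PORT A =====
-- KEYBOARD: the non-int entries None and '*' can never compare equal to int(i) in
-- Python, so they are modelled exactly as non-matching `none` entries.
def pvKeyboard : List (List (Option Int)) :=
  [[some 1, some 2, some 3], [some 4, some 5, some 6],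
   [some 7, some 8, some 9], [none, some 0, none]]

def pvPositionLoop (rows : List (List (Option Int))) (row : Int) (n : Int) :
    Option (Int × Int) :=
  match rows with
  | [] => none
  | col :: rest =>
    match PySem.List.index? col (some n) with
    | some k => some (row, (k : Int))      -- col.index succeeded
    | none => pvPositionLoop rest (row + 1) n  -- ValueError: pass

def pvPosition (c : Char) : Option (Int × Int) :=
  match PySem.Int.ofChars? [c] with
  | none => none   -- int(i) raises ValueError in every row; the loop falls through → None
  | some n => pvPositionLoop pvKeyboard 0 n

-- _steps_between; subscripting None raises TypeError in Python — those inputs are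
-- excluded by Pre_, the 0 branch is never reached inside it.
def pvStepsBetween : Option (Int × Int) → Option (Int × Int) → Int
  | some p, some q => |p.2 - q.2| + |p.1 - q.1|
  | _, _ => 0

def pvEffort (dist : List (Option (Int × Int))) : Int :=
  (PySem.List.pyRange 0 ((dist.length : Int) - 1) 1).foldl
    (fun acc j => acc + pvStepsBetween (PySem.List.pyGetD dist j none)
                                       (PySem.List.pyGetD dist (j + 1) none)) 0

def microwave_numbers (seconds : Int) : Int :=
  let s_distance := (PySem.Int.toChars seconds).map pvPosition
  let s_effort := pvEffort s_distance
  let minutes := PySem.Int.floordiv seconds 60 * 100 + PySem.Int.mod seconds 60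
  let m_distance := (PySem.Int.toChars minutes).map pvPosition
  let m_effort := pvEffort m_distance
  -- 'a and b or c' : seconds is truthy (≠ 0) exactly when the and-chain yields it
  if s_effort < m_effort ∧ seconds ≠ 0 then seconds else minutes

-- ===== PORT B =====
def pvCoord (d : Int) : Int × Int :=
  if d = 0 then (3, 1)
  else (PySem.Int.floordiv (d - 1) 3, PySem.Int.mod (d - 1) 3)

-- _DIST: the comprehension over a in range(10) for b in range(10)
def pvDist : List Int :=
  (PySem.List.pyRange 0 10 1).flatMap fun a =>
    (PySem.List.pyRange 0 10 1).map fun b =>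
      |(pvCoord a).1 - (pvCoord b).1| + |(pvCoord a).2 - (pvCoord b).2|

-- _travel's while loop; the index 10*(n%10)+d is always in range 0..99, so the
-- pyGetD default 0 is never used (Python's _DIST[...] never raises here).
def pvTravel (n : Int) (e : Int) : Int :=
  if _h : 10 ≤ n then
    let n' := PySem.Int.floordiv n 10
    let d := PySem.Int.mod n 10
    pvTravel n' (e + PySem.List.pyGetD pvDist (10 * PySem.Int.mod n' 10 + d) 0)
  else e
termination_by n.toNat
decreasing_by
  simp only [PySem.Int.floordiv_eq_ediv_of_pos (by norm_num : (0:Int) < 10)]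
  omega

def microwave_numbers_alt (seconds : Int) : Int :=
  let minutes := 100 * PySem.Int.floordiv seconds 60 + PySem.Int.mod seconds 60
  if pvTravel seconds 0 < pvTravel minutes 0 then seconds else minutes

-- ===== PRECONDITION & SPEC =====
-- On seconds < 0, str(seconds) starts with '-', _position returns None and
-- _steps_between raises TypeError — excluded.
def Pre_microwave_numbers (seconds : Int) : Prop := 0 ≤ seconds
instance (seconds : Int) : Decidable (Pre_microwave_numbers seconds) := by
  unfold Pre_microwave_numbers; infer_instance
def pvWitness_microwave_numbers : Int := 130

def Spec_microwave_numbers (seconds : Int) (out : Int) : Prop := out = microwave_numbers_alt seconds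
instance (seconds : Int) (out : Int) : Decidable (Spec_microwave_numbers seconds out) := by unfold Spec_microwave_numbers; infer_instance

-- ===== CLAIM =====
def Claim_equal_microwave_numbers : Prop := ∀ (seconds : Int), Dom_microwave_numbers seconds → Pre_microwave_numbers seconds → Spec_microwave_numbers seconds (microwave_numbers seconds)

-- ===== LEMMAS AND PROOFS =====

-- keypad coordinate of a digit character (proof-side abbreviation)
def pvPosC (c : Char) : Int × Int := pvCoord ((PySem.Int.ofChars? [c]).getD 0)

-- pairwise Manhattan travel over a list of coordinates (proof-side)
def pvPairSum (l : List (Int × Int)) : Int :=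
  ((l.zip l.tail).map (fun pq => |pq.1.1 - pq.2.1| + |pq.1.2 - pq.2.2|)).sum

lemma pvPos_agree (c : Char) (h : c.isDigit = true) :
    pvPosition c = some (pvPosC c) := by
  have hmem : c ∈ ['0','1','2','3','4','5','6','7','8','9'] := by
    simp [Char.isDigit] at h
    obtain ⟨h1, h2⟩ := h
    have hv1 : 48 ≤ c.toNat := by exact_mod_cast h1
    have hv2 : c.toNat ≤ 57 := by exact_mod_cast h2
    have hc := Char.ofNat_toNat c
    interval_cases hn : c.toNat <;> simp_all [← hc]
  fin_cases hmem <;> decide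

lemma pvToChars_digits (n : Int) (hn : 0 ≤ n) :
    ∀ c ∈ PySem.Int.toChars n, c.isDigit = true := by
  intro c hc
  unfold PySem.Int.toChars at hc
  rw [if_neg (by omega)] at hc
  exact Nat.isDigit_of_mem_toDigits (by norm_num) (by norm_num) hc

lemma pvSum_range_getD {α : Type} (d : α) (f : α → α → Int) :
    ∀ l : List α,
      ((List.range (l.length - 1)).map
        (fun k => f (l.getD k d) (l.getD (k + 1) d))).sum
      = ((l.zip l.tail).map (fun pq => f pq.1 pq.2)).sum
  | [] => by simp
  | [x] => by simp
  | x :: y :: t => by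
    have ih := pvSum_range_getD d f (y :: t)
    simp only [List.length_cons, Nat.add_sub_cancel, List.range_succ_eq_map,
      List.map_cons, List.map_map, List.sum_cons, List.tail_cons, List.zip_cons_cons] at ih ⊢
    rw [← ih]
    rfl

lemma pvEffort_eq (l : List (Int × Int)) :
    pvEffort (l.map some) = pvPairSum l := by
  unfold pvEffort pvPairSum
  rw [PySem.List.pyRange_one, List.foldl_map]
  have hcast : ∀ (k : Nat), ((0:Int) + ↑k) = (k : Int) := by intro k; omega
  simp only [hcast]
  have hcast2 : ∀ (k : Nat), ((k:Int) + 1) = ((k + 1 : Nat) : Int) := by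
    intro k; push_cast; ring
  simp only [hcast2, PySem.List.pyGetD_natCast]
  rw [PySem.List.foldl_add]
  have hlen : (((l.map some).length : Int) - 1 - 0).toNat = (l.map some).length - 1 := by
    simp
  rw [hlen, pvSum_range_getD none (fun a b => pvStepsBetween a b) (l.map some)]
  have htail : (l.map some).tail = l.tail.map some := by cases l <;> simp
  rw [htail, List.zip_map]
  simp only [List.map_map]
  rw [zero_add]
  congr 1
  refine List.map_congr_left (fun pq _ => ?_)
  simp [pvStepsBetween]
  ring

-- A's effort over str(n) is the pairwise coordinate travel
lemma pvEffort_pairSum (n : Int) (hn : 0 ≤ n) :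
    pvEffort ((PySem.Int.toChars n).map pvPosition)
      = pvPairSum ((PySem.Int.toChars n).map pvPosC) := by
  have hmap : (PySem.Int.toChars n).map pvPosition
      = ((PySem.Int.toChars n).map pvPosC).map some := by
    rw [List.map_map]
    exact List.map_congr_left (fun c hc => pvPos_agree c (pvToChars_digits n hn c hc))
  rw [hmap, pvEffort_eq]

-- ---- structure of Nat.toDigits ----

lemma pvTDC_shift (fuel : Nat) : ∀ (n : Nat) (ds : List Char),
    Nat.toDigitsCore 10 fuel n ds = Nat.toDigitsCore 10 fuel n [] ++ ds := by
  induction fuel with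
  | zero => intro n ds; simp [Nat.toDigitsCore]
  | succ f ih =>
    intro n ds
    simp only [Nat.toDigitsCore]
    by_cases h : n / 10 = 0
    · simp [h]
    · rw [if_neg h, if_neg h, ih (n / 10) (Nat.digitChar (n % 10) :: ds),
        ih (n / 10) [Nat.digitChar (n % 10)], List.append_assoc]
      rfl

lemma pvTDC_fuel : ∀ (n f1 f2 : Nat), n < f1 → n < f2 →
    Nat.toDigitsCore 10 f1 n [] = Nat.toDigitsCore 10 f2 n [] := by
  intro n
  induction n using Nat.strong_induction_on with
  | _ n ih =>
    intro f1 f2 h1 h2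
    match f1, f2 with
    | f1 + 1, f2 + 1 =>
      simp only [Nat.toDigitsCore]
      by_cases h : n / 10 = 0
      · simp [h]
      · rw [if_neg h, if_neg h, pvTDC_shift f1, pvTDC_shift f2,
          ih (n / 10) (by omega) f1 f2 (by omega) (by omega)]

lemma pvToDigits_lt (n : Nat) (h : n < 10) :
    Nat.toDigits 10 n = [Nat.digitChar n] := by
  have h0 : n / 10 = 0 := by omega
  have h1 : n % 10 = n := by omega
  simp [Nat.toDigits, Nat.toDigitsCore, h0, h1]

lemma pvToDigits_step (n : Nat) (h : 10 ≤ n) :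
    Nat.toDigits 10 n
      = Nat.toDigits 10 (n / 10) ++ [Nat.digitChar (n % 10)] := by
  have h0 : n / 10 ≠ 0 := by omega
  show Nat.toDigitsCore 10 (n + 1) n [] = _
  conv_lhs => rw [Nat.toDigitsCore]
  rw [if_neg h0, pvTDC_shift, pvTDC_fuel (n / 10) n (n / 10 + 1) (by omega) (by omega)]
  rfl

lemma pvToDigits_getLast? : ∀ n : Nat,
    (Nat.toDigits 10 n).getLast? = some (Nat.digitChar (n % 10)) := by
  intro n
  by_cases h : n < 10
  · rw [pvToDigits_lt n h]
    simp [Nat.mod_eq_of_lt h]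
  · rw [pvToDigits_step n (by omega)]
    simp

-- adding one coordinate at the right end adds the distance from the previous last
lemma pvPairSum_append : ∀ (l : List (Int × Int)) (lx x : Int × Int),
    l.getLast? = some lx →
    pvPairSum (l ++ [x]) = pvPairSum l + (|lx.1 - x.1| + |lx.2 - x.2|)
  | [], _, _, h => by simp at h
  | [a], lx, x, h => by
    simp at h
    subst h
    simp [pvPairSum]
  | a :: b :: t, lx, x, h => by
    have ih := pvPairSum_append (b :: t) lx x (by simpa using h)
    simp only [pvPairSum, List.cons_append, List.tail_cons, List.zip_cons_cons,
      List.map_cons, List.sum_cons] at ih ⊢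
    omega

-- the coordinate of a digit's char is pvCoord of the digit
lemma pvPosC_digitChar (d : Nat) (h : d < 10) :
    pvPosC (Nat.digitChar d) = pvCoord (d : Int) := by
  interval_cases d <;> decide

-- the table holds the Manhattan distances
lemma pvDist_lookup (a b : Int) (ha0 : 0 ≤ a) (ha : a < 10) (hb0 : 0 ≤ b) (hb : b < 10) :
    PySem.List.pyGetD pvDist (10 * a + b) 0
      = |(pvCoord a).1 - (pvCoord b).1| + |(pvCoord a).2 - (pvCoord b).2| := by
  interval_cases a <;> interval_cases b <;> decide

-- B's loop computes the pairwise travel over the decimal digits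
lemma pvTravel_eq : ∀ (m : Nat) (e : Int),
    pvTravel (m : Int) e = e + pvPairSum ((Nat.toDigits 10 m).map pvPosC) := by
  intro m
  induction m using Nat.strong_induction_on with
  | _ m ih =>
    intro e
    by_cases h : m < 10
    · rw [pvTravel, dif_neg (by exact_mod_cast (by omega : ¬ (10:Int) ≤ (m:Int))),
        pvToDigits_lt m h]
      simp [pvPairSum]
    · have h10 : (10:Int) ≤ (m:Int) := by exact_mod_cast (by omega : 10 ≤ m)
      have hdiv : PySem.Int.floordiv (m : Int) 10 = ((m / 10 : Nat) : Int) := by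
        rw [PySem.Int.floordiv_eq_ediv_of_pos (by norm_num)]
        omega
      have hmod : PySem.Int.mod (m : Int) 10 = ((m % 10 : Nat) : Int) := by
        rw [PySem.Int.mod_eq_emod_of_pos (by norm_num)]
        omega
      have hmod2 : PySem.Int.mod ((m / 10 : Nat) : Int) 10 = ((m / 10 % 10 : Nat) : Int) := by
        rw [PySem.Int.mod_eq_emod_of_pos (by norm_num)]
        omega
      rw [pvTravel, dif_pos h10]
      simp only [hdiv, hmod, hmod2]
      rw [ih (m / 10) (by omega)]
      have hlookup := pvDist_lookup ((m / 10 % 10 : Nat) : Int) ((m % 10 : Nat) : Int)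
        (by positivity) (by exact_mod_cast Nat.mod_lt _ (by norm_num))
        (by positivity) (by exact_mod_cast Nat.mod_lt _ (by norm_num))
      rw [hlookup]
      rw [pvToDigits_step m (by omega), List.map_append, List.map_cons, List.map_nil]
      rw [pvPairSum_append ((Nat.toDigits 10 (m / 10)).map pvPosC)
            (pvPosC (Nat.digitChar (m / 10 % 10))) (pvPosC (Nat.digitChar (m % 10)))
            (by rw [List.getLast?_map, pvToDigits_getLast?]; rfl)]
      rw [pvPosC_digitChar (m / 10 % 10) (Nat.mod_lt _ (by norm_num)),
          pvPosC_digitChar (m % 10) (Nat.mod_lt _ (by norm_num))]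
      ring

-- both sides compute the same travel for a nonnegative number
lemma pvEffort_agree (n : Int) (hn : 0 ≤ n) :
    pvEffort ((PySem.Int.toChars n).map pvPosition) = pvTravel n 0 := by
  obtain ⟨m, rfl⟩ := Int.eq_ofNat_of_zero_le hn
  rw [pvEffort_pairSum _ hn, pvTravel_eq m 0]
  have htc : PySem.Int.toChars (m : Int) = Nat.toDigits 10 m := by
    unfold PySem.Int.toChars
    rw [if_neg (by omega)]
    simp
  rw [htc, zero_add]

-- ===== VERDICT =====
theorem microwave_numbers_spec : Claim_equal_microwave_numbers := by
  intro seconds _ hpre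
  unfold Spec_microwave_numbers microwave_numbers microwave_numbers_alt
  have hmin : PySem.Int.floordiv seconds 60 * 100 + PySem.Int.mod seconds 60
      = 100 * PySem.Int.floordiv seconds 60 + PySem.Int.mod seconds 60 := by ring
  have hmin_nonneg : 0 ≤ 100 * PySem.Int.floordiv seconds 60 + PySem.Int.mod seconds 60 := by
    have h1 : 0 ≤ PySem.Int.floordiv seconds 60 := by
      rw [PySem.Int.floordiv_eq_ediv_of_pos (by norm_num)]
      exact Int.ediv_nonneg hpre (by norm_num)
    have h2 : 0 ≤ PySem.Int.mod seconds 60 := PySem.Int.mod_nonneg _ (by norm_num)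
    omega
  simp only [hmin, pvEffort_agree _ hpre, pvEffort_agree _ hmin_nonneg]
  by_cases h0 : seconds = 0
  · subst h0
    have hM : 100 * PySem.Int.floordiv 0 60 + PySem.Int.mod 0 60 = 0 := by decide
    rw [hM]
    simp
  · by_cases hlt : pvTravel seconds 0
        < pvTravel (100 * PySem.Int.floordiv seconds 60 + PySem.Int.mod seconds 60) 0
    · rw [if_pos ⟨hlt, h0⟩, if_pos hlt]
    · rw [if_neg (by tauto), if_neg hlt]
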